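-- pv_equiv track=rewrite | github.com/9ranjal/Babel | chunking/templates/template_registry.py | _apply_generic_economy_template
-- ===== SOURCE A (Python) =====
-- from typing import Dict, Callable, Optional, List, Tuple
--
-- def _apply_generic_economy_template(row: Dict) -> str:
--     """Generic template for economy/statistics type data."""
--     statistic = None
--     sector = None
--     data = None
--     commentary = None
--
--     # Look for statistic name
--     for key in row.keys():
--         if any(word in key.lower() for word in ["statistic", "name", "indicator", "metric"]):
--             if row[key] and str(row[key]).strip():
--                 statistic = str(row[key]).strip()
--                 break
--
--     # Look for sector
--     for key in row.keys():
--         if any(word in key.lower() for word in ["sector", "category", "type"]):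
--             if row[key] and str(row[key]).strip():
--                 sector = str(row[key]).strip()
--                 break
--
--     # Look for data value
--     for key in row.keys():
--         if any(word in key.lower() for word in ["data", "value", "amount", "quantity"]):
--             if row[key] and str(row[key]).strip():
--                 data = str(row[key]).strip()
--                 break
--
--     # Look for commentary
--     for key in row.keys():
--         if any(word in key.lower() for word in ["commentary", "note", "description", "detail"]):
--             if row[key] and str(row[key]).strip():
--                 commentary = str(row[key]).strip()
--                 break
--
--     parts = []
--     if statistic:
--         parts.append(f"{statistic}")
--     if sector:
--         parts.append(f"in the {sector} sector")
--     if data: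
--         parts.append(f"shows {data}")
--     if commentary:
--         parts.append(f"({commentary})")
--
--     if parts:
--         return " ".join(parts) + "."
--
--     return None
-- ===== SOURCE B (Python) =====
-- def _apply_generic_economy_template(row):
--     CATS = [["statistic", "name", "indicator", "metric"],
--             ["sector", "category", "type"],
--             ["data", "value", "amount", "quantity"],
--             ["commentary", "note", "description", "detail"]]
--     slots = [None, None, None, None]
--     for key, v in row.items():
--         kl = key.lower()
--         text = str(v).strip() if v else ""
--         if text:
--             slots = [text if sl is None and any(w in kl for w in words) else sl
--                      for sl, words in zip(slots, CATS)]
--     statistic, sector, data, commentary = slots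
--     fragments = [(statistic, "{}"), (sector, "in the {} sector"),
--                  (data, "shows {}"), (commentary, "({})")]
--     parts = [fmt.format(v) for v, fmt in fragments if v]
--     return " ".join(parts) + "." if parts else None
-- ===== Notes on version B (the rewrite author's own statement) =====
-- stated objective: simpler
-- what changed: Replaces A's four sequential break-on-first-hit scans of the row with a single pass that fills four independent slots from a category/format table, lowercasing and stripping each value once.
import Mathlib
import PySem

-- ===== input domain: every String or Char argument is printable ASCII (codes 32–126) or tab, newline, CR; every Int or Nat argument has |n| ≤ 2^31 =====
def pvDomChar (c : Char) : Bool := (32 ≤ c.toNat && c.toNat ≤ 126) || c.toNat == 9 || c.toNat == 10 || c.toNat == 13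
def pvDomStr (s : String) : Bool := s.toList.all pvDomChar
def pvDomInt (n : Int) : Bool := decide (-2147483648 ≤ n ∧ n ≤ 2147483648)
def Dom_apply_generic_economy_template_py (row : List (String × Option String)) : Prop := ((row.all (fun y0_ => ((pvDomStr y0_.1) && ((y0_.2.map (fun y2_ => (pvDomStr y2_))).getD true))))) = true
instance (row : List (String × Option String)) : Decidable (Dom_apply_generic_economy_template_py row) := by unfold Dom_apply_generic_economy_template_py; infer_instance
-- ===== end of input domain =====

-- B replaces A's four sequential break-on-hit scans of the row by ONE pass that fills four
-- independent slots from a category table (objective: simpler; return value only, no mutation).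

-- ===== PORT A =====
-- one 'for key in row.keys(): if any(word in key.lower() …): if row[key] and str(row[key]).strip(): take it and break'
def pvScanA (words : List String) : List (String × Option String) → Option String
  | [] => none
  | (k, v) :: rest =>
    if words.any (fun w => PySem.Str.isIn w (PySem.Str.lower k)) then
      match v with
      | some s =>
          if s ≠ "" && PySem.Str.strip s ≠ "" then some (PySem.Str.strip s)
          else pvScanA words rest
      | none => pvScanA words rest
    else pvScanA words rest

-- the tail of A: parts = []; if statistic: …; if sector: …; join + "."
def pvTailA (statistic sector data commentary : Option String) : Option String :=
  let parts : List String := []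
  let parts := match statistic with
    | some s => if s ≠ "" then parts ++ [s] else parts
    | none => parts
  let parts := match sector with
    | some s => if s ≠ "" then parts ++ ["in the " ++ s ++ " sector"] else parts
    | none => parts
  let parts := match data with
    | some s => if s ≠ "" then parts ++ ["shows " ++ s] else parts
    | none => parts
  let parts := match commentary with
    | some s => if s ≠ "" then parts ++ ["(" ++ s ++ ")"] else parts
    | none => parts
  if parts ≠ [] then some (PySem.Str.join " " parts ++ ".") else none

def apply_generic_economy_template_py (row : List (String × Option String)) : Option String :=
  let items := (PySem.Dict.ofList row).items
  let statistic := pvScanA ["statistic", "name", "indicator", "metric"] items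
  let sector := pvScanA ["sector", "category", "type"] items
  let data := pvScanA ["data", "value", "amount", "quantity"] items
  let commentary := pvScanA ["commentary", "note", "description", "detail"] items
  pvTailA statistic sector data commentary

-- ===== PORT B =====
def pvCatsB : List (List String) :=
  [["statistic", "name", "indicator", "metric"],
   ["sector", "category", "type"],
   ["data", "value", "amount", "quantity"],
   ["commentary", "note", "description", "detail"]]

-- one loop body: lowercase once, stripped text once, rebuild the four slots by zip
def pvStepB (slots : List (Option String)) (kv : String × Option String) : List (Option String) :=
  let kl := PySem.Str.lower kv.1
  let text := match kv.2 with
    | some s => if s ≠ "" then PySem.Str.strip s else ""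
    | none => ""
  if text ≠ "" then
    (List.zip slots pvCatsB).map (fun p =>
      if p.1.isNone && p.2.any (fun w => PySem.Str.isIn w kl) then some text else p.1)
  else slots

-- '[fmt.format(v) for v, fmt in fragments if v]' then join + "."
def pvTailB (statistic sector data commentary : Option String) : Option String :=
  let fragments : List (Option String × (String → String)) :=
    [(statistic, fun s => s), (sector, fun s => "in the " ++ s ++ " sector"),
     (data, fun s => "shows " ++ s), (commentary, fun s => "(" ++ s ++ ")")]
  let parts := fragments.filterMap (fun p =>
    match p.1 with
    | some s => if s ≠ "" then some (p.2 s) else none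
    | none => none)
  if parts ≠ [] then some (PySem.Str.join " " parts ++ ".") else none

def apply_generic_economy_template_py_alt (row : List (String × Option String)) : Option String :=
  let items := (PySem.Dict.ofList row).items
  match items.foldl pvStepB [none, none, none, none] with
  | [statistic, sector, data, commentary] => pvTailB statistic sector data commentary
  | _ => none

-- ===== PRECONDITION & SPEC =====
def Spec_apply_generic_economy_template_py (row : List (String × Option String)) (out : Option String) : Prop := out = apply_generic_economy_template_py_alt row
instance (row : List (String × Option String)) (out : Option String) : Decidable (Spec_apply_generic_economy_template_py row out) := by unfold Spec_apply_generic_economy_template_py; infer_instance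

-- ===== CLAIM (what is proved, stated in full; the proofs are below) =====
def Claim_equal_apply_generic_economy_template_py : Prop := ∀ (row : List (String × Option String)), Dom_apply_generic_economy_template_py row → Spec_apply_generic_economy_template_py row (apply_generic_economy_template_py row)

-- ===== LEMMAS AND PROOFS =====\n
-- proof-side abbreviations (used only by the lemmas below)
def pvText (v : Option String) : String :=
  match v with
  | some s => if s ≠ "" then PySem.Str.strip s else ""
  | none => ""

def pvM (words : List String) (k : String) : Bool :=
  words.any (fun w => PySem.Str.isIn w (PySem.Str.lower k))

def pvUpd (sl : Option String) (m : Bool) (t : String) : Option String :=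
  if sl.isNone && m then some t else sl

theorem step_eval (a b c d : Option String) (k : String) (v : Option String) :
    pvStepB [a, b, c, d] (k, v) =
      if pvText v ≠ "" then
        [pvUpd a (pvM ["statistic", "name", "indicator", "metric"] k) (pvText v),
         pvUpd b (pvM ["sector", "category", "type"] k) (pvText v),
         pvUpd c (pvM ["data", "value", "amount", "quantity"] k) (pvText v),
         pvUpd d (pvM ["commentary", "note", "description", "detail"] k) (pvText v)]
      else [a, b, c, d] := rfl

theorem scan_cons (words : List String) (k : String) (v : Option String)
    (rest : List (String × Option String)) :
    pvScanA words ((k, v) :: rest) =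
      if pvM words k = true ∧ pvText v ≠ "" then some (pvText v)
      else pvScanA words rest := by
  cases v with
  | none => by_cases hm : pvM words k = true <;> simp [pvScanA, pvM, pvText] at hm ⊢
  | some s =>
    by_cases hm : pvM words k = true <;>
      by_cases hs : s = "" <;>
        by_cases ht : PySem.Str.strip s = "" <;>
          simp [pvScanA, pvM, pvText] at hm ⊢ <;>
            simp [hm, hs, ht]

theorem comp_or (sl : Option String) (m : Bool) (t : String) (ht : t ≠ "")
    (f : Unit → Option String) :
    (pvUpd sl m t).orElse f =
      sl.orElse (fun _ => if m = true ∧ t ≠ "" then some t else f ()) := by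
  cases sl <;> cases m <;> simp [pvUpd, ht, Option.orElse]

-- one pass with independent slots = the four break-on-first-hit scans (for ANY item list)
theorem foldB_eq_scans (l : List (String × Option String)) (a b c d : Option String) :
    l.foldl pvStepB [a, b, c, d] =
      [a.orElse (fun _ => pvScanA ["statistic", "name", "indicator", "metric"] l),
       b.orElse (fun _ => pvScanA ["sector", "category", "type"] l),
       c.orElse (fun _ => pvScanA ["data", "value", "amount", "quantity"] l),
       d.orElse (fun _ => pvScanA ["commentary", "note", "description", "detail"] l)] := by
  induction l generalizing a b c d with
  | nil => cases a <;> cases b <;> cases c <;> cases d <;> rfl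
  | cons kv rest ih =>
    obtain ⟨k, v⟩ := kv
    rw [List.foldl_cons, step_eval]
    by_cases htext : pvText v = ""
    · rw [if_neg (not_not_intro htext), ih]
      simp [scan_cons, htext]
    · rw [if_pos htext, ih]
      simp only [scan_cons, List.cons.injEq]
      exact ⟨comp_or _ _ _ htext _, comp_or _ _ _ htext _, comp_or _ _ _ htext _,
        comp_or _ _ _ htext _, trivial⟩

theorem tails_eq (st se da co : Option String) : pvTailA st se da co = pvTailB st se da co := by
  cases st <;> cases se <;> cases da <;> cases co <;>
    simp only [pvTailA, pvTailB, List.filterMap] <;>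
    split_ifs <;> simp_all

-- ===== VERDICT (by name: the statement is the Claim_ definition above) =====
theorem apply_generic_economy_template_py_spec : Claim_equal_apply_generic_economy_template_py := by
  intro row _
  unfold Spec_apply_generic_economy_template_py
  show pvTailA (pvScanA ["statistic", "name", "indicator", "metric"] (PySem.Dict.ofList row).items)
      (pvScanA ["sector", "category", "type"] (PySem.Dict.ofList row).items)
      (pvScanA ["data", "value", "amount", "quantity"] (PySem.Dict.ofList row).items)
      (pvScanA ["commentary", "note", "description", "detail"] (PySem.Dict.ofList row).items)
    = match ((PySem.Dict.ofList row).items).foldl pvStepB [none, none, none, none] with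
      | [statistic, sector, data, commentary] => pvTailB statistic sector data commentary
      | _ => none
  rw [foldB_eq_scans]
  exact tails_eq _ _ _ _
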